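-- pv_equiv track=rewrite | github.com/surus-lat/benchy | src/engine/output_diagnostics.py | _max_whitespace_run
-- ===== SOURCE A (Python) =====
-- def _max_whitespace_run(text: str) -> int:
--     max_run = 0
--     run = 0
--     for ch in text:
--         if ch in (" ", "\n", "\r", "\t"):
--             run += 1
--             if run > max_run:
--                 max_run = run
--         else:
--             run = 0
--     return max_run
-- ===== SOURCE B (Python) =====
-- def _max_whitespace_run(text: str) -> int:
--     best = 0
--     i = 0
--     n = len(text)
--     while i < n:
--         if text[i] in (" ", "\n", "\r", "\t"):
--             j = i + 1
--             while j < n and text[j] in (" ", "\n", "\r", "\t"):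
--                 j += 1
--             if j - i > best:
--                 best = j - i
--             i = j
--         else:
--             i += 1
--     return best
-- ===== Notes on version B (the rewrite author's own statement) =====
-- stated objective: alternative
-- what changed: B enumerates each maximal whitespace run with a two-pointer inner scan and takes the max of run lengths, instead of A's per-character running counter with incremental max update.
import Mathlib
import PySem

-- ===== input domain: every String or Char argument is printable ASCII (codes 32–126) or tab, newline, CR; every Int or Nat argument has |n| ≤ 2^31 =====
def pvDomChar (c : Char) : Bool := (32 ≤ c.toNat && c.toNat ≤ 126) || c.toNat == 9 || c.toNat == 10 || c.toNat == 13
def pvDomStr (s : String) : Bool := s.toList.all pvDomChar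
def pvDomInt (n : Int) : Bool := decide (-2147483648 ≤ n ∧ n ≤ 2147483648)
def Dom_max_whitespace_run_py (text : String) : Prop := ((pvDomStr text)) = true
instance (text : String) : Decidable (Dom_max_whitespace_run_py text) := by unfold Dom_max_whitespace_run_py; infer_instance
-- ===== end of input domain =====

-- B replaces A's per-character running counter by a two-pointer scan that enumerates
-- each maximal whitespace run once and maxes over run lengths (objective: alternative).

-- ===== PORT A =====
-- `ch in (" ", "\n", "\r", "\t")` on a 1-char string = equality with one of the four chars
def pvWs (c : Char) : Bool := c == ' ' || c == '\n' || c == '\r' || c == '\t'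

-- A's loop body over state (max_run, run)
def pvGoA (st : Int × Int) (c : Char) : Int × Int :=
  if pvWs c then
    let run := st.2 + 1
    if run > st.1 then (run, run) else (st.1, run)
  else (st.1, 0)

def max_whitespace_run_py (text : String) : Int :=
  (text.toList.foldl pvGoA (0, 0)).1

-- ===== PORT B =====
-- Source B's inner `while j < n and text[j] in …: j += 1` scan: number of leading
-- whitespace chars after position i; the index scan is rendered as list recursion (exact).
def pvWsRun : List Char → Nat
  | [] => 0
  | c :: t => if pvWs c then pvWsRun t + 1 else 0

-- Source B's outer while loop: at a whitespace char, measure the whole run, jump past it.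
def pvGoB : List Char → Int → Int
  | [], best => best
  | c :: t, best =>
    if pvWs c then
      pvGoB (t.drop (pvWsRun t)) (max best ((pvWsRun t : Int) + 1))
    else
      pvGoB t best
termination_by l _ => l.length
decreasing_by
  all_goals simp [List.length_drop]

def max_whitespace_run_py_alt (text : String) : Int :=
  pvGoB text.toList 0

-- ===== PRECONDITION & SPEC =====
def Spec_max_whitespace_run_py (text : String) (out : Int) : Prop := out = max_whitespace_run_py_alt text
instance (text : String) (out : Int) : Decidable (Spec_max_whitespace_run_py text out) := by unfold Spec_max_whitespace_run_py; infer_instance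

-- ===== CLAIM (what is proved, stated in full; the proofs are below) =====
def Claim_equal_max_whitespace_run_py : Prop := ∀ (text : String), Dom_max_whitespace_run_py text → Spec_max_whitespace_run_py text (max_whitespace_run_py text)

-- ===== LEMMAS AND PROOFS =====

theorem pvGoA_ws {c : Char} (h : pvWs c = true) (m r : Int) :
    pvGoA (m, r) c = (max m (r + 1), r + 1) := by
  simp only [pvGoA, h, if_true]
  split_ifs with h' <;> simp <;> omega

theorem pvGoA_nonws {c : Char} (h : pvWs c = false) (m r : Int) :
    pvGoA (m, r) c = (m, 0) := by
  simp [pvGoA, h]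

-- A's fold carried through a whitespace run: max is bumped by the run, list jumps past it.
theorem pvA_skip (t : List Char) (m r : Int) (hr : 0 ≤ r) (hm : r ≤ m) :
    List.foldl pvGoA (m, r) t
      = List.foldl pvGoA (max m (r + (pvWsRun t : Int)), r + (pvWsRun t : Int)) (t.drop (pvWsRun t)) := by
  induction t generalizing m r with
  | nil =>
    simp [pvWsRun, max_eq_left hm]
  | cons c t ih =>
    by_cases h : pvWs c = true
    · simp only [pvWsRun, h, if_true, List.drop_succ_cons, List.foldl_cons, pvGoA_ws h]
      rw [ih (max m (r + 1)) (r + 1) (by omega) (by omega)]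
      congr 2 <;> push_cast <;> omega
    · simp only [pvWsRun, h, Bool.false_eq_true, if_false, Nat.cast_zero, add_zero,
        List.drop_zero]
      rw [max_eq_left hm]

-- after a maximal run the next char (if any) is not whitespace
theorem pvWsRun_drop_head (t : List Char) :
    ∀ c, (t.drop (pvWsRun t)).head? = some c → pvWs c = false := by
  induction t with
  | nil => simp
  | cons c t ih =>
    intro d hd
    by_cases h : pvWs c = true
    · simp only [pvWsRun, h, if_true, List.drop_succ_cons] at hd
      exact ih d hd
    · simp only [pvWsRun, h, Bool.false_eq_true, if_false, List.drop_zero,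
        List.head?_cons, Option.some.injEq] at hd
      simp [← hd, h]

-- if the list starts with a non-whitespace char (or is empty), the carried run is irrelevant
theorem pvA_run_irrel (l : List Char) (m r r' : Int)
    (h : ∀ c, l.head? = some c → pvWs c = false) :
    (List.foldl pvGoA (m, r) l).1 = (List.foldl pvGoA (m, r') l).1 := by
  cases l with
  | nil => rfl
  | cons c t =>
    have hc := h c (by simp)
    simp [List.foldl_cons, pvGoA_nonws hc]

theorem pvMain (l : List Char) (best : Int) :
    (List.foldl pvGoA (best, 0) l).1 = pvGoB l best := by
  induction l, best using pvGoB.induct with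
  | case1 b => simp [pvGoB]
  | case2 c t b h ih =>
    simp only [List.foldl_cons, pvGoA_ws h, pvGoB, h, if_true, zero_add]
    rw [pvA_skip t (max b 1) 1 (by omega) (by omega)]
    rw [pvA_run_irrel _ _ _ 0 (pvWsRun_drop_head t)]
    have hmx : max (max b 1) (1 + (pvWsRun t : Int)) = max b ((pvWsRun t : Int) + 1) := by
      omega
    rw [hmx, ih]
  | case3 c t b h ih =>
    simp only [List.foldl_cons, pvGoA_nonws (Bool.not_eq_true _ ▸ h : pvWs c = false), pvGoB, h]
    exact ih

-- ===== VERDICT (by name: the statement is the Claim_ definition above) =====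
theorem max_whitespace_run_py_spec : Claim_equal_max_whitespace_run_py := by
  intro text _
  unfold Spec_max_whitespace_run_py max_whitespace_run_py max_whitespace_run_py_alt
  exact pvMain text.toList 0
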